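-- pv_equiv track=rewrite | github.com/MrHamdulay/csc3-capstone | examples/data/Assignment_8/pllluv002/question2.py | char_pair
-- ===== SOURCE A (Python) =====
-- def char_pair(word):
--
--     if len(word) % 2 == 0:
--         if len(word)== 0:
--             return 0
--         # retrun 1 and function if a set pf repeats is found
--         if word[0] == word[1]:
--             return 1 + char_pair(word[2:])
--
--         # if no repeats just return function
--         else:
--             return char_pair(word[2:])
--
--     else:
--         if len(word)== 1:
--             return 0
--         # retrun 1 and function if a set pf repeats is found
--         if word[0] == word[1]:
--             return 1 + char_pair(word[2:])
--
--         # if no repeats just return function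
--         else:
--             return char_pair(word[2:])
-- ===== SOURCE B (Python) =====
-- def char_pair(word):
--     count = 0
--     for i in range(0, len(word) - 1, 2):
--         if word[i] == word[i + 1]:
--             count += 1
--     return count
-- ===== Notes on version B (the rewrite author's own statement) =====
-- stated objective: faster
-- what changed: Replaces A's duplicated-branch two-character tail recursion over slice copies (word[2:] each step) by a single iterative for-loop over even offsets with an integer counter (no slicing, no recursion).
import Mathlib
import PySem

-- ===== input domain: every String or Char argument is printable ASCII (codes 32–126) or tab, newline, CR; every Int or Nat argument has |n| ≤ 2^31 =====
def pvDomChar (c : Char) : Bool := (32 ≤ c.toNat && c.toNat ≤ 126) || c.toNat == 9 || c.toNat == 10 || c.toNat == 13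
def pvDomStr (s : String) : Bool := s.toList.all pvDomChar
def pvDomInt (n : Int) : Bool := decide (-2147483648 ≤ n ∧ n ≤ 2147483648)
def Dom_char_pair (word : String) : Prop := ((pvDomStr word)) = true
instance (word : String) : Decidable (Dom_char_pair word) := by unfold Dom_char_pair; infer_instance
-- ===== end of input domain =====

-- B replaces A's duplicated-branch two-character tail recursion (with slice copies) by a single
-- iterative counter loop over even offsets; same return value on every input.

-- ===== PORT A =====
-- A's recursion, transliterated on the character list of the string (branches in A's order).
def charPairGo (s : List Char) : Int :=
  if PySem.Chars.len s % 2 == 0 then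
    if PySem.Chars.len s == 0 then 0
    else if PySem.Chars.pyGet? s 0 == PySem.Chars.pyGet? s 1 then
      1 + charPairGo (PySem.Chars.slice s (some 2) none)
    else
      charPairGo (PySem.Chars.slice s (some 2) none)
  else
    if PySem.Chars.len s == 1 then 0
    else if PySem.Chars.pyGet? s 0 == PySem.Chars.pyGet? s 1 then
      1 + charPairGo (PySem.Chars.slice s (some 2) none)
    else
      charPairGo (PySem.Chars.slice s (some 2) none)
termination_by s.length
decreasing_by
  all_goals
    rw [PySem.Chars.slice_eq_listSlice, PySem.List.slice_from _ (by norm_num : (0:Int) ≤ 2)]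
  all_goals
    simp only [PySem.Chars.len, beq_iff_eq, List.length_drop] at *
  all_goals omega

def char_pair (word : String) : Int := charPairGo word.toList

-- ===== PORT B =====
-- B: count = 0; for i in range(0, len(word)-1, 2): if word[i]==word[i+1]: count += 1
def char_pair_alt (word : String) : Int :=
  (PySem.List.pyRange 0 (PySem.Str.len word - 1) 2).foldl
    (fun count i =>
      if PySem.Str.pyGet? word i == PySem.Str.pyGet? word (i + 1) then count + 1 else count)
    0

-- ===== PRECONDITION & SPEC =====
def Spec_char_pair (word : String) (out : Int) : Prop := out = char_pair_alt word
instance (word : String) (out : Int) : Decidable (Spec_char_pair word out) := by unfold Spec_char_pair; infer_instance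

-- ===== CLAIM (what is proved, stated in full; the proofs are below) =====
def Claim_equal_char_pair : Prop := ∀ (word : String), Dom_char_pair word → Spec_char_pair word (char_pair word)

-- ===== LEMMAS AND PROOFS =====

-- Reference count: matching pairs at even offsets, by structural two-step recursion.
def cpSpec : List Char → Int
  | [] => 0
  | [_] => 0
  | a :: b :: t => (if a == b then 1 else 0) + cpSpec t

theorem pyGet?_cons₀ (a b : Char) (t : List Char) :
    PySem.List.pyGet? (a :: b :: t) 0 = some a := by
  have h : (0:Int) ≤ (t.length : Int) + 1 := by positivity
  simp [PySem.List.pyGet?, PySem.List.pyIdx?, h]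

theorem pyGet?_cons₁ (a b : Char) (t : List Char) :
    PySem.List.pyGet? (a :: b :: t) 1 = some b := by
  simp [PySem.List.pyGet?, PySem.List.pyIdx?]

theorem pyGet?_shift (a b : Char) (t : List Char) (k : ℕ) :
    PySem.List.pyGet? (a :: b :: t) (2 * (((k:ℕ) + 1 : ℕ) : Int)) = PySem.List.pyGet? t (2 * (k : Int)) := by
  rw [show (2 * (((k:ℕ) + 1 : ℕ) : Int)) = ((2 * k + 2 : ℕ) : Int) by push_cast; ring,
      PySem.List.pyGet?_natCast,
      show (2 * (k:Int)) = ((2 * k : ℕ) : Int) by push_cast; ring,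
      PySem.List.pyGet?_natCast]
  simp [show 2 * k + 2 = (2 * k) + 1 + 1 by omega]

theorem pyGet?_shift' (a b : Char) (t : List Char) (k : ℕ) :
    PySem.List.pyGet? (a :: b :: t) (2 * (((k:ℕ) + 1 : ℕ) : Int) + 1) = PySem.List.pyGet? t (2 * (k : Int) + 1) := by
  rw [show (2 * (((k:ℕ) + 1 : ℕ) : Int) + 1) = ((2 * k + 3 : ℕ) : Int) by push_cast; ring,
      PySem.List.pyGet?_natCast,
      show (2 * (k:Int) + 1) = ((2 * k + 1 : ℕ) : Int) by push_cast; ring,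
      PySem.List.pyGet?_natCast]
  simp [show 2 * k + 3 = (2 * k + 1) + 1 + 1 by omega]

theorem charPairGo_eq_cpSpec (s : List Char) : charPairGo s = cpSpec s := by
  induction s using cpSpec.induct with
  | case1 => simp [charPairGo, cpSpec, PySem.Chars.len]
  | case2 a => simp [charPairGo, cpSpec, PySem.Chars.len]
  | case3 a b t ih =>
      rw [charPairGo, PySem.Chars.slice_eq_listSlice,
        PySem.List.slice_from _ (by norm_num : (0:Int) ≤ 2)]
      have hd : List.drop (Int.toNat 2) (a :: b :: t) = t := by rfl
      rw [hd]
      simp only [PySem.Chars.pyGet?_eq_listPyGet?, pyGet?_cons₀, pyGet?_cons₁,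
        PySem.Chars.len, List.length_cons, cpSpec]
      by_cases hab : a = b <;> split_ifs with p q <;> simp_all <;> omega

theorem sum_even_pairs (s : List Char) :
    ((List.range (s.length / 2)).map
      (fun (k : ℕ) => if PySem.List.pyGet? s (2 * (k : Int)) == PySem.List.pyGet? s (2 * (k : Int) + 1)
                then (1:Int) else 0)).sum = cpSpec s := by
  induction s using cpSpec.induct with
  | case1 => simp [cpSpec]
  | case2 a => simp [cpSpec]
  | case3 a b t ih =>
      have hlen : (a :: b :: t).length / 2 = t.length / 2 + 1 := by
        simp [List.length_cons]; omega
      rw [hlen, List.range_succ_eq_map]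
      simp only [List.map_cons, List.map_map, List.sum_cons, cpSpec, Nat.cast_zero, mul_zero,
        zero_add, pyGet?_cons₀, pyGet?_cons₁]
      have hmapeq : (List.range (t.length / 2)).map
            ((fun (k : ℕ) => if PySem.List.pyGet? (a :: b :: t) (2 * (k : Int)) == PySem.List.pyGet? (a :: b :: t) (2 * (k : Int) + 1)
                then (1:Int) else 0) ∘ (fun (n : ℕ) => n + 1)) =
          (List.range (t.length / 2)).map
            (fun (k : ℕ) => if PySem.List.pyGet? t (2 * (k : Int)) == PySem.List.pyGet? t (2 * (k : Int) + 1)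
                then (1:Int) else 0) := by
        apply List.map_congr_left
        intro k _
        simp only [Function.comp_apply, pyGet?_shift, pyGet?_shift']
      rw [show (Nat.succ : ℕ → ℕ) = (fun (n : ℕ) => n + 1) from rfl, hmapeq, ih]
      by_cases hab : a = b <;> simp [hab]

theorem range_eq (L : ℕ) :
    PySem.List.pyRange 0 ((L : Int) - 1) 2 =
      (List.range (L / 2)).map (fun (k : ℕ) => (2 * (k : Int))) := by
  rw [PySem.List.pyRange_of_pos 0 ((L : Int) - 1) (by norm_num)]
  have hc : (if (0:Int) < (L:Int) - 1 then (((L:Int) - 1 - 0 + 2 - 1) / 2).toNat else 0) = L / 2 := by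
    split_ifs with h
    · omega
    · omega
  rw [hc]
  apply List.map_congr_left
  intro k _
  ring

theorem char_pair_alt_eq (word : String) : char_pair_alt word = cpSpec word.toList := by
  unfold char_pair_alt
  have hbody : (fun (count : Int) (i : Int) =>
      if PySem.Str.pyGet? word i == PySem.Str.pyGet? word (i + 1) then count + 1 else count) =
      (fun (count : Int) (i : Int) => count +
        if PySem.Str.pyGet? word i == PySem.Str.pyGet? word (i + 1) then (1:Int) else 0) := by
    funext c i; split_ifs <;> simp
  rw [hbody, PySem.List.foldl_add, PySem.Str.len_eq, range_eq word.toList.length, List.map_map]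
  have hmapeq : (List.range (word.toList.length / 2)).map
        ((fun (i : Int) => if PySem.Str.pyGet? word i == PySem.Str.pyGet? word (i + 1) then (1:Int) else 0) ∘
          (fun (k : ℕ) => (2 * (k : Int)))) =
      (List.range (word.toList.length / 2)).map
        (fun (k : ℕ) => if PySem.List.pyGet? word.toList (2 * (k : Int)) == PySem.List.pyGet? word.toList (2 * (k : Int) + 1)
            then (1:Int) else 0) := by
    apply List.map_congr_left
    intro k _
    simp [Function.comp_apply, PySem.Str.pyGet?, PySem.Chars.pyGet?_eq_listPyGet?]
  rw [hmapeq, sum_even_pairs]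
  simp

-- ===== VERDICT (by name: the statement is the Claim_ definition above) =====
theorem char_pair_spec : Claim_equal_char_pair := by
  intro word _
  unfold Spec_char_pair char_pair
  rw [charPairGo_eq_cpSpec, char_pair_alt_eq]
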